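-- pv_equiv track=rewrite | github.com/SolomonB14D3/noethersolve | noethersolve/audit_facts.py | _approx_tokens
-- ===== SOURCE A (Python) =====
-- def _approx_tokens(text: str) -> int:
--     """Approximate token count using whitespace + punctuation splitting.
--
--     This is intentionally simple — no real tokenizer needed. The heuristic
--     splits on whitespace, then counts additional tokens for punctuation and
--     special characters that most tokenizers split (parentheses, brackets,
--     operators, etc.). Roughly matches BPE token counts within ~20%.
--     """
--     if not text:
--         return 0
--     words = text.split()
--     count = 0
--     for word in words:
--         count += 1
--         # Extra tokens for punctuation/operators that BPE typically splits
--         for ch in word: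
--             if ch in "()[]{}×÷±²³√∝∞≈≠≤≥":
--                 count += 1
--     return max(count, 1)
-- ===== SOURCE B (Python) =====
-- PUNCT = "()[]{}×÷±²³√∝∞≈≠≤≥"
--
--
-- def _approx_tokens(text: str) -> int:
--     if not text:
--         return 0
--     # Single character-level state machine: never materializes words.
--     # A word is counted at its first character (a non-space char whose
--     # predecessor state is "not inside a word"); punctuation is counted
--     # on the fly in the same scan.
--     count = 0
--     in_word = False
--     for ch in text:
--         if ch.isspace():
--             in_word = False
--         else:
--             if not in_word:
--                 count += 1
--                 in_word = True
--             if ch in PUNCT: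
--                 count += 1
--     return max(count, 1)
-- ===== Notes on version B (the rewrite author's own statement) =====
-- stated objective: alternative
-- what changed: Replaces split()-into-words plus a nested per-word character loop by a single character-level state machine that never builds the word list: it counts a word at each space-to-nonspace transition (an in_word flag) and punctuation in the same flat scan.
import Mathlib
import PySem

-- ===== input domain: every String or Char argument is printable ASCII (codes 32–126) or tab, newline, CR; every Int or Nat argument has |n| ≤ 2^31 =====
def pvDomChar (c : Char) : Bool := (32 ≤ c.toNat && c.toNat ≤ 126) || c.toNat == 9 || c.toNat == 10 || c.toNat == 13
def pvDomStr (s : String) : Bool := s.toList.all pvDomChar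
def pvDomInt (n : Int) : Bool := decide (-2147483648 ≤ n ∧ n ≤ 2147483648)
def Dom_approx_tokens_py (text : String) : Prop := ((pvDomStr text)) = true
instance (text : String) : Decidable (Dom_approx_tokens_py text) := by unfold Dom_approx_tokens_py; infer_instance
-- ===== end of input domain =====

-- B replaces A's split()-into-words + nested per-word loop by a single character-level
-- state machine (in_word flag) that never builds the word list: alternative decomposition.


-- the punctuation-set literal shared by both Pythons: "()[]{}×÷±²³√∝∞≈≠≤≥"
def pvPunct : List Char := "()[]{}×÷±²³√∝∞≈≠≤≥".toList

-- ===== PORT A =====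
def approx_tokens_py (text : String) : Int :=
  if text.toList = [] then 0
  else
    let words := PySem.Str.split₀ text
    let count := words.foldl (fun count word =>
      word.toList.foldl (fun count ch =>
        if pvPunct.contains ch then count + 1 else count) (count + 1)) (0 : Int)
    max count 1

-- ===== PORT B =====
def approx_tokens_py_alt (text : String) : Int :=
  if text.toList = [] then 0
  else
    let r := text.toList.foldl (fun (s : Int × Bool) ch =>
      if PySem.Chars.isspace ch then (s.1, false)
      else
        let c := if s.2 then s.1 else s.1 + 1
        (if pvPunct.contains ch then c + 1 else c, true)) ((0 : Int), false)
    max r.1 1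

-- ===== PRECONDITION & SPEC =====
def Spec_approx_tokens_py (text : String) (out : Int) : Prop := out = approx_tokens_py_alt text
instance (text : String) (out : Int) : Decidable (Spec_approx_tokens_py text out) := by unfold Spec_approx_tokens_py; infer_instance

-- ===== CLAIM (what is proved, stated in full; the proofs are below) =====
def Claim_equal_approx_tokens_py : Prop := ∀ (text : String), Dom_approx_tokens_py text → Spec_approx_tokens_py text (approx_tokens_py text)

-- ===== LEMMAS AND PROOFS =====

-- no punctuation character is whitespace
theorem pvPunct_not_space : ∀ c, pvPunct.contains c = true → PySem.Chars.isspace c = false := by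
  intro c hc
  have hall : pvPunct.all (fun c => !PySem.Chars.isspace c) = true := by decide
  simpa using List.all_eq_true.mp hall c (by simpa using hc)

-- split₀ drops only whitespace: the per-word counts of a non-whitespace predicate sum to the whole-text count
theorem go_countP_sum (p : Char → Bool) (hp : ∀ c, p c = true → PySem.Chars.isspace c = false) :
    ∀ (cs cur : List Char) (acc : List (List Char)),
      (((PySem.Chars.split₀.go cs cur acc).map (List.countP p)).sum : Nat)
        = (acc.map (List.countP p)).sum + cur.countP p + cs.countP p := by
  intro cs
  induction cs with
  | nil =>
    intro cur acc
    unfold PySem.Chars.split₀.go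
    by_cases h : cur.isEmpty = true
    · simp [List.isEmpty_iff.mp h]
    · simp [h, List.countP_reverse]
  | cons c rest ih =>
    intro cur acc
    unfold PySem.Chars.split₀.go
    by_cases hs : PySem.Chars.isspace c = true
    · have hpc : p c = false := by
        by_contra hpc
        have := hp c (by simpa using hpc)
        simp [this] at hs
      by_cases h : cur.isEmpty = true
      · simp [hs, ih, List.isEmpty_iff.mp h, hpc]
      · simp [hs, h, ih, hpc, List.countP_reverse]
        omega
    · simp [hs, ih, List.countP_cons]
      omega

theorem split₀_countP_sum (p : Char → Bool) (hp : ∀ c, p c = true → PySem.Chars.isspace c = false)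
    (cs : List Char) :
    (((PySem.Chars.split₀ cs).map (List.countP p)).sum : Nat) = cs.countP p := by
  have h := go_countP_sum p hp cs [] []
  simpa [PySem.Chars.split₀] using h

-- B's state machine counts exactly (number of words produced by split₀.go beyond acc/cur) + punctuation
theorem scan_eq_go :
    ∀ (cs cur : List Char) (acc : List (List Char)) (a : Int),
      (cs.foldl (fun (s : Int × Bool) ch =>
        if PySem.Chars.isspace ch then (s.1, false)
        else
          let c := if s.2 then s.1 else s.1 + 1
          (if pvPunct.contains ch then c + 1 else c, true)) (a, !cur.isEmpty)).1
        + (acc.length : Int) + (if cur.isEmpty then 0 else 1)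
      = a + ((PySem.Chars.split₀.go cs cur acc).length : Int)
          + (cs.countP (fun ch => pvPunct.contains ch) : Int) := by
  intro cs
  induction cs with
  | nil =>
    intro cur acc a
    unfold PySem.Chars.split₀.go
    by_cases h : cur.isEmpty = true
    · simp [h]
    · simp [h]
      omega
  | cons c rest ih =>
    intro cur acc a
    unfold PySem.Chars.split₀.go
    by_cases hs : PySem.Chars.isspace c = true
    · have hpc : c ∉ pvPunct := by
        intro hmem
        have := pvPunct_not_space c (by simpa using hmem)
        simp [this] at hs
      by_cases h : cur.isEmpty = true
      · have := ih [] acc a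
        simp [hs, h, hpc] at this ⊢
        simpa using this
      · have := ih [] (cur.reverse :: acc) a
        simp [hs, h, hpc] at this ⊢
        omega
    · have hcur : (c :: cur).isEmpty = false := by simp
      by_cases h : cur.isEmpty = true
      -- not in a word: count a new word (a+1), then maybe punctuation
      · have := ih (c :: cur) acc (if pvPunct.contains c then a + 1 + 1 else a + 1)
        simp [hs, h, hcur, List.countP_cons] at this ⊢
        by_cases hp : c ∈ pvPunct
        · simp [hp] at this ⊢; omega
        · simp [hp] at this ⊢; omega
      · have := ih (c :: cur) acc (if pvPunct.contains c then a + 1 else a)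
        simp [hs, h, hcur, List.countP_cons] at this ⊢
        by_cases hp : c ∈ pvPunct
        · simp [hp] at this ⊢; omega
        · simp [hp] at this ⊢; omega

-- ===== VERDICT (by name: the statement is the Claim_ definition above) =====
theorem approx_tokens_py_spec : Claim_equal_approx_tokens_py := by
  intro text _
  unfold Spec_approx_tokens_py approx_tokens_py approx_tokens_py_alt
  by_cases h : text.toList = []
  · simp [h]
  · simp only [if_neg h]
    -- A's nested fold = words + punct
    have hstep : ∀ (a : Int) (w : String),
        w.toList.foldl (fun count ch => if pvPunct.contains ch then count + 1 else count) (a + 1)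
          = a + (1 + (w.toList.countP (fun ch => pvPunct.contains ch) : Int)) := by
      intro a w
      rw [PySem.List.foldl_if_add_one]
      ring
    rw [PySem.List.foldl_congr_mem (PySem.Str.split₀ text) _
      (fun a w => a + ((1 : Int) + ((String.toList w).countP (fun ch => pvPunct.contains ch) : Int)))
      0 (fun a w _ => hstep a w)]
    rw [PySem.List.foldl_add (PySem.Str.split₀ text)
      (fun w => (1 : Int) + ((String.toList w).countP (fun ch => pvPunct.contains ch) : Int)) 0]
    have hsum : (((PySem.Str.split₀ text).map (fun w =>
        (1 : Int) + ((String.toList w).countP (fun ch => pvPunct.contains ch) : Int))).sum)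
        = ((PySem.Str.split₀ text).length : Int)
          + ((text.toList.countP (fun ch => pvPunct.contains ch) : Int)) := by
      have hb := split₀_countP_sum (fun ch => pvPunct.contains ch) pvPunct_not_space text.toList
      rw [← PySem.Str.split₀_map_toList, List.map_map] at hb
      rw [PySem.List.sum_map_add_int (PySem.Str.split₀ text) (fun _ => (1 : Int))
        (fun w => ((String.toList w).countP (fun ch => pvPunct.contains ch) : Int)),
        PySem.List.sum_map_const_int]
      have hc : ((PySem.Str.split₀ text).map (fun w =>
          ((String.toList w).countP (fun ch => pvPunct.contains ch) : Int))).sum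
          = (text.toList.countP (fun ch => pvPunct.contains ch) : Int) := by
        rw [← hb]
        push_cast [Function.comp]
        rw [List.map_map]
        rfl
      rw [hc]
      ring
    rw [hsum]
    -- B's state machine = words + punct
    have hscan := scan_eq_go text.toList [] [] 0
    have hgo : PySem.Chars.split₀.go text.toList [] [] = PySem.Chars.split₀ text.toList := rfl
    have hlen : (PySem.Chars.split₀ text.toList).length = (PySem.Str.split₀ text).length := by
      rw [← PySem.Str.split₀_map_toList, List.length_map]
    simp only [hgo, hlen] at hscan
    simp at hscan ⊢
    omega
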